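-- pv_equiv track=rewrite | github.com/goelhardik/programming | hackerrank/red_john_is_back/sol.py | find_brick_ways
-- ===== SOURCE A (Python) =====
-- def find_brick_ways(n):
--     dp = [0 for i in range(n + 1)]
--     dp[0] = 1
--     for i in range(n + 1):  # like coin change problem; for each size, update future possible ways
--         if (i + 1 <= n):
--             dp[i + 1] += dp[i]
--         if (i + 4 <= n):
--             dp[i + 4] += dp[i]
--
--     return dp[n]
-- ===== SOURCE B (Python) =====
-- def find_brick_ways(n):
--     # square-and-multiply on the 4x4 companion matrix of f(i) = f(i-1) + f(i-4): O(log n)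
--     def mul(A, B):
--         return tuple(tuple(sum(A[i][k] * B[k][j] for k in range(4)) for j in range(4)) for i in range(4))
--     res = ((1, 0, 0, 0), (0, 1, 0, 0), (0, 0, 1, 0), (0, 0, 0, 1))
--     base = ((1, 0, 0, 1), (1, 0, 0, 0), (0, 1, 0, 0), (0, 0, 1, 0))
--     e = n
--     while e > 0:
--         if e & 1:
--             res = mul(res, base)
--         base = mul(base, base)
--         e >>= 1
--     r = res[3]
--     return r[0] + r[1] + r[2] + r[3]
-- ===== Notes on version B (the rewrite author's own statement) =====
-- stated objective: faster
-- what changed: replaces the O(n) forward coin-change dp array with square-and-multiply exponentiation of the 4x4 companion matrix of f(i)=f(i-1)+f(i-4)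
import Mathlib
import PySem

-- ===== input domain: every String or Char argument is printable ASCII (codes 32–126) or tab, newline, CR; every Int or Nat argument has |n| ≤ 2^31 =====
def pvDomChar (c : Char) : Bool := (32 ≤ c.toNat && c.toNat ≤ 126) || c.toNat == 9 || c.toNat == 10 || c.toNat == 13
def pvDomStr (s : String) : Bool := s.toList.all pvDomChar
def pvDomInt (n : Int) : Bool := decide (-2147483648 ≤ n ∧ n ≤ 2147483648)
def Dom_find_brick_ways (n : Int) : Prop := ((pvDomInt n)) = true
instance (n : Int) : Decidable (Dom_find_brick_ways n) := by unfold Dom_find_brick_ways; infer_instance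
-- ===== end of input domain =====

-- B replaces A's O(n) forward-update dp array by square-and-multiply exponentiation of
-- the 4x4 companion matrix of f(i) = f(i-1) + f(i-4) (objective: faster, O(log n)).

-- ===== PORT A =====
-- literal transliteration of A: dp list, forward updates, dp[n] at the end
def find_brick_ways (n : Int) : Int :=
  let dp0 : List Int := (List.replicate (n + 1).toNat 0).set 0 1
  let dp := (List.range (n + 1).toNat).foldl (fun (dp : List Int) (i : Nat) =>
      let dp := if (i : Int) + 1 ≤ n then dp.set (i + 1) (dp.getD (i + 1) 0 + dp.getD i 0) else dp
      let dp := if (i : Int) + 4 ≤ n then dp.set (i + 4) (dp.getD (i + 4) 0 + dp.getD i 0) else dp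
      dp) dp0
  dp.getD n.toNat 0  -- under Pre_ (0 ≤ n) the index n is always in range, so getD is exact

-- ===== PORT B =====
-- Python's 4-tuple rows / 4x4 tuple matrices become nested products
abbrev PvRow : Type := Int × Int × Int × Int
abbrev PvM4 : Type := PvRow × PvRow × PvRow × PvRow

-- Source B's mul comprehension, with the range(4) sums written out entry by entry (exact)
def pvDot (r c : PvRow) : Int := r.1 * c.1 + r.2.1 * c.2.1 + r.2.2.1 * c.2.2.1 + r.2.2.2 * c.2.2.2

def pvCol (B : PvM4) (j : PvRow → Int) : PvRow := (j B.1, j B.2.1, j B.2.2.1, j B.2.2.2)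

def pvRowMul (r : PvRow) (B : PvM4) : PvRow :=
  (pvDot r (pvCol B (·.1)), pvDot r (pvCol B (·.2.1)),
   pvDot r (pvCol B (·.2.2.1)), pvDot r (pvCol B (·.2.2.2)))

def pvMul (A B : PvM4) : PvM4 :=
  (pvRowMul A.1 B, pvRowMul A.2.1 B, pvRowMul A.2.2.1 B, pvRowMul A.2.2.2 B)

def pvI : PvM4 := ((1, 0, 0, 0), (0, 1, 0, 0), (0, 0, 1, 0), (0, 0, 0, 1))
def pvM : PvM4 := ((1, 0, 0, 1), (1, 0, 0, 0), (0, 1, 0, 0), (0, 0, 1, 0))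

-- Source B's while-loop: res/base/e, square-and-multiply (e ≥ 0 as a Nat; for n < 0 the loop runs 0 times, like Python's)
def pvBinpow (res base : PvM4) (e : Nat) : PvM4 :=
  if e = 0 then res
  else pvBinpow (if e % 2 = 1 then pvMul res base else res) (pvMul base base) (e / 2)
termination_by e
decreasing_by omega

def find_brick_ways_alt (n : Int) : Int :=
  let p := pvBinpow pvI pvM n.toNat
  let r := p.2.2.2
  r.1 + r.2.1 + r.2.2.1 + r.2.2.2

-- ===== PRECONDITION & SPEC =====
-- A raises IndexError for negative n (the dp list is empty, so its initial assignment fails); Pre_ excludes exactly those inputs.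
def Pre_find_brick_ways (n : Int) : Prop := 0 ≤ n
instance (n : Int) : Decidable (Pre_find_brick_ways n) := by unfold Pre_find_brick_ways; infer_instance
def pvWitness_find_brick_ways : Int := (5)

def Spec_find_brick_ways (n : Int) (out : Int) : Prop := out = find_brick_ways_alt n
instance (n : Int) (out : Int) : Decidable (Spec_find_brick_ways n out) := by unfold Spec_find_brick_ways; infer_instance

-- ===== CLAIM (what is proved, stated in full; the proofs are below) =====
def Claim_equal_find_brick_ways : Prop := ∀ (n : Int), Dom_find_brick_ways n → Pre_find_brick_ways n → Spec_find_brick_ways n (find_brick_ways n)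

-- ===== LEMMAS AND PROOFS =====

-- the tiling count: f 0..3 = 1, f (k+4) = f (k+3) + f k
def f : Nat → Int
  | 0 => 1
  | 1 => 1
  | 2 => 1
  | 3 => 1
  | (k+4) => f (k+3) + f k

-- state of A's dp array after k loop iterations, at index j
def g (k j : Nat) : Int :=
  if j = 0 then 1
  else (if j - 1 < k then f (j - 1) else 0) + (if 4 ≤ j ∧ j - 4 < k then f (j - 4) else 0)

lemma g_eq_f (k j : Nat) (h : j ≤ k) : g k j = f j := by
  unfold g
  rcases j with _ | _ | _ | _ | m
  · simp [f]
  · simp [f]; omega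
  · simp [f]; omega
  · simp [f]; omega
  · have h1 : m + 4 - 1 < k := by omega
    have h2 : 4 ≤ m + 4 ∧ m + 4 - 4 < k := by omega
    simp only [if_neg (by omega : ¬ (m + 4 = 0)), if_pos h1, if_pos h2]
    show f (m + 3) + f m = f (m + 4)
    rfl

lemma getD_map_range (F : Nat → Int) (N m : Nat) :
    ((List.range N).map F).getD m 0 = if m < N then F m else 0 := by
  by_cases h : m < N
  · rw [List.getD_eq_getElem _ _ (by simpa using h)]
    simp [h]
  · rw [List.getD_eq_default _ _ (by simpa using (by omega : N ≤ m))]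
    simp [h]

lemma set_map_range (F : Nat → Int) (N i : Nat) (v : Int) :
    ((List.range N).map F).set i v
      = (List.range N).map (fun j => if i = j then v else F j) := by
  apply List.ext_getElem
  · simp
  · intro j h1 h2
    simp [List.getElem_set]

lemma map_range_ext (F G : Nat → Int) (N : Nat) (h : ∀ j, j < N → F j = G j) :
    (List.range N).map F = (List.range N).map G := by
  apply List.ext_getElem
  · simp
  · intro j h1 h2
    simp only [List.getElem_map, List.getElem_range]
    exact h j (by simpa using h1)

lemma g_other (k j : Nat) (h1 : j ≠ k + 1) (h4 : j ≠ k + 4) : g k j = g (k + 1) j := by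
  unfold g
  split_ifs <;> first | rfl | omega

lemma g_upd1 (k : Nat) : g k (k + 1) + g k k = g (k + 1) (k + 1) := by
  rw [g_eq_f k k le_rfl, g_eq_f (k + 1) (k + 1) le_rfl]
  unfold g
  rcases Nat.lt_or_ge k 3 with h | h
  · interval_cases k <;> simp [f]
  · have e : k + 1 - 4 = k - 3 := by omega
    simp only [if_neg (by omega : ¬(k + 1 = 0)), if_neg (by omega : ¬(k + 1 - 1 < k)), e,
      if_pos (show 4 ≤ k + 1 ∧ k - 3 < k by omega)]
    obtain ⟨m, rfl⟩ : ∃ m, k = m + 3 := ⟨k - 3, by omega⟩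
    show 0 + f (m + 3 - 3) + f (m + 3) = f (m + 4)
    rw [show m + 3 - 3 = m from by omega, show f (m + 4) = f (m + 3) + f m from rfl]
    ring

lemma g_upd4 (k : Nat) : g k (k + 4) + g k k = g (k + 1) (k + 4) := by
  rw [g_eq_f k k le_rfl]
  unfold g
  simp only [if_neg (by omega : ¬(k + 4 = 0)), if_neg (by omega : ¬(k + 4 - 1 < k)),
    if_neg (by omega : ¬(k + 4 - 1 < k + 1)), Nat.add_sub_cancel]
  simp

-- one iteration of A's loop transforms g k into g (k+1)
lemma step_eq (n : Int) (hn : 0 ≤ n) (k : Nat) (hk : k < (n + 1).toNat) :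
    (let dp := if (k : Int) + 1 ≤ n then
        ((List.range ((n + 1).toNat)).map (g k)).set (k + 1)
          (((List.range ((n + 1).toNat)).map (g k)).getD (k + 1) 0 +
           ((List.range ((n + 1).toNat)).map (g k)).getD k 0)
      else (List.range ((n + 1).toNat)).map (g k)
     let dp := if (k : Int) + 4 ≤ n then dp.set (k + 4) (dp.getD (k + 4) 0 + dp.getD k 0) else dp
     dp)
    = (List.range ((n + 1).toNat)).map (g (k + 1)) := by
  have hN : (n + 1).toNat = n.toNat + 1 := by omega
  by_cases h1 : (k : Int) + 1 ≤ n
  · by_cases h4 : (k : Int) + 4 ≤ n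
    · have c4 : k + 4 < (n + 1).toNat := by omega
      have c1 : k + 1 < (n + 1).toNat := by omega
      have c0 : k < (n + 1).toNat := hk
      simp only [if_pos h1, if_pos h4, getD_map_range, set_map_range]
      apply map_range_ext
      intro j hj
      by_cases e4 : k + 4 = j
      · rw [if_pos e4, if_pos c4, if_neg (by omega : ¬ k + 1 = k + 4), if_pos c0,
          if_neg (by omega : ¬ k + 1 = k), ← e4]
        exact g_upd4 k
      · rw [if_neg e4]
        by_cases e1 : k + 1 = j
        · rw [if_pos e1, if_pos c1, if_pos c0, ← e1]
          exact g_upd1 k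
        · rw [if_neg e1]
          exact g_other k j (by omega) (by omega)
    · have c1 : k + 1 < (n + 1).toNat := by omega
      have c0 : k < (n + 1).toNat := hk
      simp only [if_pos h1, if_neg h4, getD_map_range, set_map_range]
      apply map_range_ext
      intro j hj
      by_cases e1 : k + 1 = j
      · rw [if_pos e1, if_pos c1, if_pos c0, ← e1]
        exact g_upd1 k
      · rw [if_neg e1]
        exact g_other k j (by omega) (by omega)
  · have h4 : ¬ ((k : Int) + 4 ≤ n) := by omega
    simp only [if_neg h1, if_neg h4]
    apply map_range_ext
    intro j hj
    apply g_other <;> omega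

lemma loopA (n : Int) (hn : 0 ≤ n) (k : Nat) (hk : k ≤ (n + 1).toNat) :
    (List.range k).foldl (fun (dp : List Int) (i : Nat) =>
      let dp := if (i : Int) + 1 ≤ n then dp.set (i + 1) (dp.getD (i + 1) 0 + dp.getD i 0) else dp
      let dp := if (i : Int) + 4 ≤ n then dp.set (i + 4) (dp.getD (i + 4) 0 + dp.getD i 0) else dp
      dp) ((List.replicate ((n + 1).toNat) 0).set 0 1)
    = (List.range ((n + 1).toNat)).map (g k) := by
  induction k with
  | zero =>
      rw [List.range_zero, List.foldl_nil]
      apply List.ext_getElem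
      · simp
      · intro j h1 h2
        simp only [List.getElem_set, List.getElem_map, List.getElem_range, List.getElem_replicate]
        unfold g
        split_ifs <;> first | rfl | omega
  | succ k ih =>
      rw [List.range_succ, List.foldl_append, ih (by omega), List.foldl_cons, List.foldl_nil]
      exact step_eq n hn k (by omega)

lemma A_eq_f (n : Int) (hn : 0 ≤ n) : find_brick_ways n = f n.toNat := by
  simp only [find_brick_ways]
  rw [loopA n hn ((n + 1).toNat) le_rfl, getD_map_range, if_pos (by omega), g_eq_f]
  omega

-- ===== the B side: matrix exponentiation =====

-- plain iterated power, the reference semantics for pvBinpow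
def pvIpow (m : PvM4) : Nat → PvM4
  | 0 => pvI
  | k + 1 => pvMul m (pvIpow m k)

lemma pvMul_one (p : PvM4) : pvMul p pvI = p := by
  obtain ⟨⟨a, b, c, d⟩, ⟨e1, e2, e3, e4⟩, ⟨h1, h2, h3, h4⟩, ⟨i1, i2, i3, i4⟩⟩ := p
  simp [pvMul, pvRowMul, pvDot, pvCol, pvI]

lemma pvOne_mul (p : PvM4) : pvMul pvI p = p := by
  obtain ⟨⟨a, b, c, d⟩, ⟨e1, e2, e3, e4⟩, ⟨h1, h2, h3, h4⟩, ⟨i1, i2, i3, i4⟩⟩ := p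
  simp [pvMul, pvRowMul, pvDot, pvCol, pvI]

lemma pvMul_assoc (a b c : PvM4) : pvMul (pvMul a b) c = pvMul a (pvMul b c) := by
  obtain ⟨⟨a1, a2, a3, a4⟩, ⟨a5, a6, a7, a8⟩, ⟨a9, a10, a11, a12⟩, ⟨a13, a14, a15, a16⟩⟩ := a
  obtain ⟨⟨b1, b2, b3, b4⟩, ⟨b5, b6, b7, b8⟩, ⟨b9, b10, b11, b12⟩, ⟨b13, b14, b15, b16⟩⟩ := b
  obtain ⟨⟨c1, c2, c3, c4⟩, ⟨c5, c6, c7, c8⟩, ⟨c9, c10, c11, c12⟩, ⟨c13, c14, c15, c16⟩⟩ := c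
  simp only [pvMul, pvRowMul, pvDot, pvCol, Prod.mk.injEq]
  and_intros <;> ring

lemma pvIpow_sq (b : PvM4) (q : Nat) : pvIpow (pvMul b b) q = pvIpow b (2 * q) := by
  induction q with
  | zero => rfl
  | succ q ih =>
      rw [show 2 * (q + 1) = 2 * q + 1 + 1 from by omega]
      show pvMul (pvMul b b) (pvIpow (pvMul b b) q) = pvMul b (pvMul b (pvIpow b (2 * q)))
      rw [ih, pvMul_assoc]

lemma pvBinpow_eq (e : Nat) : ∀ res base : PvM4, pvBinpow res base e = pvMul res (pvIpow base e) := by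
  induction e using Nat.strong_induction_on with
  | _ e ih =>
    intro res base
    rw [pvBinpow]
    by_cases h : e = 0
    · simp [h, pvIpow, pvMul_one]
    · rw [if_neg h, ih (e / 2) (by omega), pvIpow_sq]
      by_cases ho : e % 2 = 1
      · rw [if_pos ho, show 2 * (e / 2) = e - 1 from by omega]
        obtain ⟨m, rfl⟩ : ∃ m, e = m + 1 := ⟨e - 1, by omega⟩
        rw [Nat.add_sub_cancel]
        show pvMul (pvMul res base) (pvIpow base m) = pvMul res (pvMul base (pvIpow base m))
        exact pvMul_assoc res base (pvIpow base m)
      · rw [if_neg ho, show 2 * (e / 2) = e from by omega]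

-- matrix-vector application and its interplay with pvMul
def pvVap (m : PvM4) (v : PvRow) : PvRow :=
  (pvDot m.1 v, pvDot m.2.1 v, pvDot m.2.2.1 v, pvDot m.2.2.2 v)

lemma pvVap_mul (a b : PvM4) (v : PvRow) : pvVap (pvMul a b) v = pvVap a (pvVap b v) := by
  obtain ⟨⟨a1, a2, a3, a4⟩, ⟨a5, a6, a7, a8⟩, ⟨a9, a10, a11, a12⟩, ⟨a13, a14, a15, a16⟩⟩ := a
  obtain ⟨⟨b1, b2, b3, b4⟩, ⟨b5, b6, b7, b8⟩, ⟨b9, b10, b11, b12⟩, ⟨b13, b14, b15, b16⟩⟩ := b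
  obtain ⟨v1, v2, v3, v4⟩ := v
  simp only [pvMul, pvRowMul, pvVap, pvDot, pvCol, Prod.mk.injEq]
  and_intros <;> ring

lemma pvVap_ipow (k : Nat) :
    pvVap (pvIpow pvM k) (1, 1, 1, 1) = (f (k + 3), f (k + 2), f (k + 1), f k) := by
  induction k with
  | zero => decide
  | succ k ih =>
      show pvVap (pvMul pvM (pvIpow pvM k)) (1, 1, 1, 1) = _
      rw [pvVap_mul, ih]
      show (_ : PvRow) = (f (k + 3) + f k, f (k + 3), f (k + 2), f (k + 1))
      simp only [pvVap, pvDot, pvM, Prod.mk.injEq]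
      and_intros <;> ring

lemma B_eq_f (n : Int) : find_brick_ways_alt n = f n.toNat := by
  show (let p := pvBinpow pvI pvM n.toNat
        let r := p.2.2.2
        r.1 + r.2.1 + r.2.2.1 + r.2.2.2) = f n.toNat
  rw [pvBinpow_eq, pvOne_mul]
  have h := pvVap_ipow n.toNat
  have h4 := congrArg (fun r : PvRow => r.2.2.2) h
  simp only [pvVap, pvDot] at h4
  rw [← h4]
  ring

-- ===== VERDICT (by name: the statement is the Claim_ definition above) =====
theorem find_brick_ways_spec : Claim_equal_find_brick_ways := by
  intro n _ hpre
  unfold Spec_find_brick_ways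
  rw [A_eq_f n hpre, B_eq_f n]
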